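-- pv_equiv track=rewrite | github.com/JohnNDvorak/zeta-odd-irrationaliity | wiki/raw/code/bz_dual_f7.py | _build_reduced_factor_data
-- ===== SOURCE A (Python) =====
-- def _build_reduced_factor_data(b: tuple[int, ...]) -> tuple[dict[int, int], dict[int, int], int | None]:
--     raw_counts = _build_raw_denominator_counts(b)
--     denominator_exponents: dict[int, int] = {}
--     leftover_integer_factors: dict[int, int] = {}
--     central_shift = (b[0] + 2) // 2 if b[0] % 2 == 0 else None
--
--     for shift in range(1, b[0] + 2):
--         order = raw_counts.get(shift, 0) - 1
--         if central_shift is not None and shift == central_shift: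
--             order -= 1
--         if order > 0:
--             denominator_exponents[shift] = order
--         elif raw_counts.get(shift, 0) == 0:
--             leftover_integer_factors[shift] = 1
--
--     return denominator_exponents, leftover_integer_factors, central_shift
--
-- def _build_raw_denominator_counts(b: tuple[int, ...]) -> dict[int, int]:
--     counts: dict[int, int] = {}
--     b0, *tail = b
--     for value in tail:
--         for shift in range(value + 1, b0 - value + 2):
--             counts[shift] = counts.get(shift, 0) + 1
--     return counts
-- ===== SOURCE B (Python) =====
-- def _build_reduced_factor_data(b):
--     # Difference array over the shift window 1..b[0]+1, then one prefix-sum pass.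
--     b0, *tail = b
--     central_shift = (b0 + 2) // 2 if b0 % 2 == 0 else None
--     size = max(b0 + 1, 0)          # number of shifts considered: 1 .. b0+1
--     diff = [0] * (size + 1)
--     for value in tail:
--         lo = max(value + 1, 1)             # clamp the increment range to the window
--         hi = min(b0 - value + 2, b0 + 2)   # (shifts outside it are never read)
--         if lo < hi:
--             diff[lo - 1] += 1
--             diff[hi - 1] -= 1
--     denominator_exponents = {}
--     leftover_integer_factors = {}
--     cnt = 0
--     for i in range(size):
--         cnt += diff[i]
--         shift = i + 1
--         order = cnt - 1
--         if central_shift is not None and shift == central_shift: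
--             order -= 1
--         if order > 0:
--             denominator_exponents[shift] = order
--         elif cnt == 0:
--             leftover_integer_factors[shift] = 1
--     return denominator_exponents, leftover_integer_factors, central_shift
-- ===== Notes on version B (the rewrite author's own statement) =====
-- stated objective: faster
-- what changed: Replaces the nested per-value range-increment loops building a raw-counts dict with a difference array over the shift window 1..b[0]+1 plus a single prefix-sum pass that emits both dicts.
import Mathlib
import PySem

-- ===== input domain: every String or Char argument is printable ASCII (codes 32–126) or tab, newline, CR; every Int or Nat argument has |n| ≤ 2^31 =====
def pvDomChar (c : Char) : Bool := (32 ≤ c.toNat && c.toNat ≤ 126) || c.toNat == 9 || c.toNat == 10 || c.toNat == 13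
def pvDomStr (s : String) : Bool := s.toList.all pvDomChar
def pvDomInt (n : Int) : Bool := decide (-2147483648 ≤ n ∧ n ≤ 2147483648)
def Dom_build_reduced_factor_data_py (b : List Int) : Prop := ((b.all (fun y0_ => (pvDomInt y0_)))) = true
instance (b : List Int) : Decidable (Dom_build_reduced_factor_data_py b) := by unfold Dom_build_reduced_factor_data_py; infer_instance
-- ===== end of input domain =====

-- B replaces A's nested range-increment counting dict with a difference array plus a single
-- prefix-sum pass (O(len(b)+b[0]) instead of O(len(b)*b[0])).

-- ===== PORT A =====
-- inner loop of _build_raw_denominator_counts: counts[shift] = counts.get(shift, 0) + 1 over a range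
def pvRawStep (b0 : Int) (counts : PySem.Dict Int Int) (value : Int) : PySem.Dict Int Int :=
  (PySem.List.pyRange (value + 1) (b0 - value + 2) 1).foldl
    (fun c shift => c.insert shift (c.getD shift 0 + 1)) counts

-- _build_raw_denominator_counts after the unpacking 'b0, *tail = b'
def pvRawCounts (b0 : Int) (tail : List Int) : PySem.Dict Int Int :=
  tail.foldl (pvRawStep b0) PySem.Dict.empty

-- one iteration of A's main 'for shift in range(1, b[0] + 2)' loop
def pvAStep (raw : PySem.Dict Int Int) (central : Option Int)
    (st : PySem.Dict Int Int × PySem.Dict Int Int) (shift : Int) :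
    PySem.Dict Int Int × PySem.Dict Int Int :=
  let order0 := raw.getD shift 0 - 1
  let order := if central = some shift then order0 - 1 else order0
  if order > 0 then (st.1.insert shift order, st.2)
  else if raw.getD shift 0 = 0 then (st.1, st.2.insert shift 1)
  else st

def build_reduced_factor_data_py (b : List Int) :
    (List (Int × Int)) × (List (Int × Int)) × Option Int :=
  match b with
  | [] => ([], [], none)   -- unreachable under Pre_ (Python raises ValueError unpacking b0, *tail)
  | b0 :: tail =>
    let raw := pvRawCounts b0 tail
    let central : Option Int :=
      if PySem.Int.mod b0 2 = 0 then some (PySem.Int.floordiv (b0 + 2) 2) else none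
    let p := (PySem.List.pyRange 1 (b0 + 2) 1).foldl (pvAStep raw central)
      (PySem.Dict.empty, PySem.Dict.empty)
    (p.1.items, p.2.items, central)

-- ===== PORT B =====
-- difference-array update for one value (Source B's first loop body)
def pvDiffStep (b0 : Int) (diff : List Int) (value : Int) : List Int :=
  let lo := max (value + 1) 1
  let hi := min (b0 - value + 2) (b0 + 2)
  if lo < hi then
    -- here lo ≥ 1 and hi ≥ 2, so Python's indices lo-1, hi-1 are nonnegative: toNat is exact
    let d1 := diff.set (lo - 1).toNat (diff.getD (lo - 1).toNat 0 + 1)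
    d1.set (hi - 1).toNat (d1.getD (hi - 1).toNat 0 - 1)
  else diff

-- one iteration of Source B's prefix-sum output loop (state: (de, lf, cnt))
def pvBStep (diff : List Int) (central : Option Int)
    (st : PySem.Dict Int Int × PySem.Dict Int Int × Int) (i : Nat) :
    PySem.Dict Int Int × PySem.Dict Int Int × Int :=
  let cnt := st.2.2 + diff.getD i 0
  let shift : Int := (i : Int) + 1
  let order0 := cnt - 1
  let order := if central = some shift then order0 - 1 else order0
  if order > 0 then (st.1.insert shift order, st.2.1, cnt)
  else if cnt = 0 then (st.1, st.2.1.insert shift 1, cnt)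
  else (st.1, st.2.1, cnt)

def build_reduced_factor_data_py_alt (b : List Int) :
    (List (Int × Int)) × (List (Int × Int)) × Option Int :=
  match b with
  | [] => ([], [], none)   -- unreachable under Pre_ (Source B's unpacking raises the same ValueError)
  | b0 :: tail =>
    let central : Option Int :=
      if PySem.Int.mod b0 2 = 0 then some (PySem.Int.floordiv (b0 + 2) 2) else none
    let size : Nat := (b0 + 1).toNat   -- = max(b0 + 1, 0), which is nonnegative: toNat is exact
    let diff := tail.foldl (pvDiffStep b0) (List.replicate (size + 1) 0)
    let p := (List.range size).foldl (pvBStep diff central)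
      (PySem.Dict.empty, PySem.Dict.empty, 0)
    (p.1.items, p.2.1.items, central)

-- ===== PRECONDITION & SPEC =====
-- Pre_ excludes only the empty list, on which A raises ValueError ('b0, *tail = b').
def Pre_build_reduced_factor_data_py (b : List Int) : Prop := b ≠ []
instance (b : List Int) : Decidable (Pre_build_reduced_factor_data_py b) := by
  unfold Pre_build_reduced_factor_data_py; infer_instance

def pvWitness_build_reduced_factor_data_py : List Int := [6, 1, 2, 3]

def Spec_build_reduced_factor_data_py (b : List Int)
    (out : (List (Int × Int)) × (List (Int × Int)) × Option Int) : Prop :=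
  out = build_reduced_factor_data_py_alt b
instance (b : List Int) (out : (List (Int × Int)) × (List (Int × Int)) × Option Int) :
    Decidable (Spec_build_reduced_factor_data_py b out) := by
  unfold Spec_build_reduced_factor_data_py; infer_instance

-- ===== CLAIM (what is proved, stated in full; the proofs are below) =====
def Claim_equal_build_reduced_factor_data_py : Prop :=
  ∀ (b : List Int), Dom_build_reduced_factor_data_py b →
    Pre_build_reduced_factor_data_py b →
    Spec_build_reduced_factor_data_py b (build_reduced_factor_data_py b)

-- ===== LEMMAS AND PROOFS =====

-- the per-shift raw count both programs compute
def pvCnt (b0 : Int) (tail : List Int) (s : Int) : Int :=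
  (tail.countP (fun v => decide (v + 1 ≤ s ∧ s < b0 - v + 2)) : Int)

theorem pv_count_pyRange (a b s : Int) :
    ((PySem.List.pyRange a b 1).count s : Int) = if a ≤ s ∧ s < b then 1 else 0 := by
  by_cases h : a ≤ s ∧ s < b
  · rw [List.count_eq_one_of_mem (PySem.List.nodup_pyRange_one a b)
      ((PySem.List.mem_pyRange_one).2 h)]
    simp [h]
  · rw [List.count_eq_zero_of_not_mem (fun hm => h ((PySem.List.mem_pyRange_one).1 hm))]
    simp [h]

theorem pv_getD_rawcounts (b0 : Int) (tail : List Int) (s : Int) :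
    ∀ (d : PySem.Dict Int Int),
      (tail.foldl (pvRawStep b0) d).getD s 0 = d.getD s 0 + pvCnt b0 tail s := by
  induction tail with
  | nil => intro d; simp [pvCnt]
  | cons v t ih =>
    intro d
    simp only [List.foldl_cons]
    rw [ih]
    unfold pvRawStep
    rw [PySem.Dict.getD_foldl_insert_add_one]
    simp only [pvCnt, List.countP_cons]
    rw [pv_count_pyRange]
    by_cases h : v + 1 ≤ s ∧ s < b0 - v + 2 <;> simp [h] <;> push_cast <;> ring

theorem pv_sum_take_set (l : List Int) :
    ∀ (j n : Nat) (x : Int),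
      ((l.set j x).take n).sum
        = (l.take n).sum + (if j < n ∧ j < l.length then x - l.getD j 0 else 0) := by
  induction l with
  | nil => intro j n x; simp
  | cons a t ih =>
    intro j n x
    cases j with
    | zero =>
      cases n with
      | zero => simp
      | succ m => simp [List.getD]; ring
    | succ j' =>
      cases n with
      | zero => simp
      | succ m =>
        simp only [List.set_cons_succ, List.take_succ_cons, List.sum_cons, ih j' m x,
          List.length_cons, List.getD_cons_succ]
        have : (j' + 1 < m + 1 ∧ j' + 1 < t.length + 1) ↔ (j' < m ∧ j' < t.length) := by omega
        rw [if_congr this rfl rfl]; ring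

theorem pv_sum_take_succ (l : List Int) (n : Nat) :
    (l.take (n + 1)).sum = (l.take n).sum + l.getD n 0 := by
  rw [List.take_add_one, List.sum_append, List.getD_eq_getElem?_getD]
  cases h : l[n]? <;> simp [h]

theorem pv_sum_take_foldl_diff (b0 : Int) (tail : List Int) :
    ∀ (d : List Int) (n : Nat), n ≤ d.length →
      ((tail.foldl (pvDiffStep b0) d).take n).sum
        = (d.take n).sum
          + (tail.countP (fun v =>
              decide (max (v + 1) 1 ≤ (n : Int) ∧ (n : Int) < min (b0 - v + 2) (b0 + 2))) : Int) := by
  induction tail with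
  | nil => intro d n _; simp
  | cons v t ih =>
    intro d n hn
    simp only [List.foldl_cons, List.countP_cons]
    have hlen : (pvDiffStep b0 d v).length = d.length := by
      unfold pvDiffStep; dsimp only; split <;> simp
    rw [ih (pvDiffStep b0 d v) n (by rw [hlen]; exact hn)]
    unfold pvDiffStep
    dsimp only
    have h1 : (1 : Int) ≤ max (v + 1) 1 := le_max_right _ _
    set a := max (v + 1) 1 with ha
    set c := min (b0 - v + 2) (b0 + 2) with hc
    by_cases hg : a < c
    · rw [if_pos hg, pv_sum_take_set, pv_sum_take_set]
      push_cast
      simp only [List.length_set, decide_eq_true_eq]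
      split_ifs <;> first | ring1 | (exfalso; omega)
    · rw [if_neg hg]
      push_cast
      simp only [decide_eq_true_eq]
      split_ifs <;> first | ring1 | (exfalso; omega)

-- A's output-loop step with the raw-count lookup abstracted to a function C
def pvAStep' (central : Option Int) (C : Int → Int)
    (st : PySem.Dict Int Int × PySem.Dict Int Int) (shift : Int) :
    PySem.Dict Int Int × PySem.Dict Int Int :=
  let order0 := C shift - 1
  let order := if central = some shift then order0 - 1 else order0
  if order > 0 then (st.1.insert shift order, st.2)
  else if C shift = 0 then (st.1, st.2.insert shift 1)
  else st

theorem pvAStep_eq (raw : PySem.Dict Int Int) (central : Option Int)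
    (st : PySem.Dict Int Int × PySem.Dict Int Int) (shift : Int) :
    pvAStep raw central st shift = pvAStep' central (fun s => raw.getD s 0) st shift := rfl

theorem pvBStep_eq (diff : List Int) (central : Option Int) (C : Int → Int)
    (de lf : PySem.Dict Int Int) (j : Nat)
    (hCj : (diff.take (j + 1)).sum = C ((j : Int) + 1)) :
    pvBStep diff central (de, lf, (diff.take j).sum) j
      = ((pvAStep' central C (de, lf) ((j : Int) + 1)).1,
         (pvAStep' central C (de, lf) ((j : Int) + 1)).2,
         (diff.take (j + 1)).sum) := by
  unfold pvBStep pvAStep'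
  dsimp only
  rw [← pv_sum_take_succ, hCj]
  split_ifs <;> rfl

-- main output loops agree, given cnt tracks the prefix sums which equal C
theorem pv_loops_agree (diff : List Int) (central : Option Int) (C : Int → Int) (N : Nat)
    (hC : ∀ j : Nat, j < N → (diff.take (j + 1)).sum = C ((j : Int) + 1)) :
    ∀ (n j : Nat) (de lf : PySem.Dict Int Int), j + n ≤ N →
      (List.range' j n).foldl (pvBStep diff central) (de, lf, (diff.take j).sum)
        = (((List.range' j n).foldl
              (fun (st : PySem.Dict Int Int × PySem.Dict Int Int) (i : Nat) =>
                pvAStep' central C st ((i : Int) + 1)) (de, lf)).1,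
           ((List.range' j n).foldl
              (fun (st : PySem.Dict Int Int × PySem.Dict Int Int) (i : Nat) =>
                pvAStep' central C st ((i : Int) + 1)) (de, lf)).2,
           (diff.take (j + n)).sum) := by
  intro n
  induction n with
  | zero => intro j de lf _; simp
  | succ m ih =>
    intro j de lf hb
    rw [List.range'_succ]
    simp only [List.foldl_cons]
    rw [pvBStep_eq diff central C de lf j (hC j (by omega))]
    rw [ih (j + 1) _ _ (by omega)]
    have h2 : j + (m + 1) = (j + 1) + m := by omega
    rw [h2]

theorem pv_main (b0 : Int) (tail : List Int) :
    build_reduced_factor_data_py (b0 :: tail) = build_reduced_factor_data_py_alt (b0 :: tail) := by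
  unfold build_reduced_factor_data_py build_reduced_factor_data_py_alt
  dsimp only
  have hC : ∀ j : Nat, j < (b0 + 1).toNat →
      ((tail.foldl (pvDiffStep b0) (List.replicate ((b0 + 1).toNat + 1) 0)).take (j + 1)).sum
        = pvCnt b0 tail ((j : Int) + 1) := by
    intro j hj
    rw [pv_sum_take_foldl_diff b0 tail _ (j + 1) (by simp only [List.length_replicate]; omega)]
    have hrep : (((List.replicate ((b0 + 1).toNat + 1) (0 : Int))).take (j + 1)).sum = 0 := by
      simp [List.take_replicate]
    rw [hrep]
    unfold pvCnt
    have hcp : (tail.countP (fun v =>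
        decide (max (v + 1) 1 ≤ ((j + 1 : Nat) : Int) ∧ ((j + 1 : Nat) : Int) < min (b0 - v + 2) (b0 + 2))))
        = (tail.countP (fun v => decide (v + 1 ≤ (j : Int) + 1 ∧ (j : Int) + 1 < b0 - v + 2))) := by
      apply List.countP_congr
      intro v _
      simp only [decide_eq_true_eq]
      push_cast
      omega
    rw [hcp]
    ring
  have hA : (PySem.List.pyRange 1 (b0 + 2) 1).foldl
        (pvAStep (pvRawCounts b0 tail) (if PySem.Int.mod b0 2 = 0 then some (PySem.Int.floordiv (b0 + 2) 2) else none))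
        (PySem.Dict.empty, PySem.Dict.empty)
      = (List.range' 0 (b0 + 1).toNat).foldl
          (fun (st : PySem.Dict Int Int × PySem.Dict Int Int) (i : Nat) =>
            pvAStep' (if PySem.Int.mod b0 2 = 0 then some (PySem.Int.floordiv (b0 + 2) 2) else none)
            (pvCnt b0 tail) st ((i : Int) + 1))
          (PySem.Dict.empty, PySem.Dict.empty) := by
    rw [PySem.List.pyRange_one, List.foldl_map, ← List.range_eq_range']
    have he : (b0 + 2 - 1).toNat = (b0 + 1).toNat := by omega
    rw [he]
    have hfun : (fun (st : PySem.Dict Int Int × PySem.Dict Int Int) (k : Nat) =>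
          pvAStep (pvRawCounts b0 tail)
            (if PySem.Int.mod b0 2 = 0 then some (PySem.Int.floordiv (b0 + 2) 2) else none) st (1 + (k : Int)))
        = (fun (st : PySem.Dict Int Int × PySem.Dict Int Int) (i : Nat) =>
            pvAStep' (if PySem.Int.mod b0 2 = 0 then some (PySem.Int.floordiv (b0 + 2) 2) else none)
            (pvCnt b0 tail) st ((i : Int) + 1)) := by
      funext st k
      rw [pvAStep_eq]
      have h1 : (1 : Int) + (k : Int) = (k : Int) + 1 := by ring
      rw [h1]
      have h2 : (fun s => (pvRawCounts b0 tail).getD s 0) = pvCnt b0 tail := by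
        funext s
        unfold pvRawCounts
        rw [pv_getD_rawcounts]
        simp
      rw [h2]
    rw [hfun]
  rw [hA]
  have hmain := pv_loops_agree
      (tail.foldl (pvDiffStep b0) (List.replicate ((b0 + 1).toNat + 1) 0))
      (if PySem.Int.mod b0 2 = 0 then some (PySem.Int.floordiv (b0 + 2) 2) else none)
      (pvCnt b0 tail) ((b0 + 1).toNat) hC ((b0 + 1).toNat) 0
      PySem.Dict.empty PySem.Dict.empty (by omega)
  simp only [List.take_zero, List.sum_nil, Nat.zero_add] at hmain
  rw [← List.range_eq_range'] at hmain
  rw [hmain]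
  simp [List.range_eq_range']

-- ===== VERDICT (by name: the statement is the Claim_ definition above) =====
theorem build_reduced_factor_data_py_spec : Claim_equal_build_reduced_factor_data_py := by
  unfold Claim_equal_build_reduced_factor_data_py
  intro b _ hpre
  unfold Spec_build_reduced_factor_data_py
  match b with
  | [] => exact absurd rfl hpre
  | b0 :: tail => exact pv_main b0 tail
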